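-- pv_equiv track=rewrite | github.com/CarlsonQuick/adventOfCode2020 | day10/day10.py | find_flex_points
-- ===== SOURCE A (Python) =====
-- def find_flex_points(input, map):
--     flex_points = []
--     i = 0
--     while i < len(input):
--         start_flex = i
--         end_flex = -1
--         while i < len(input) and not (len(map[input[i]]) == 1 and len(map[map[input[i]][0]]) >1):
--             end_flex = i
--             i+=1
--         i+=1
--
--         if i > len(input):
--             end_flex = len(input)-1
--         else:
--             end_flex=i
--         if end_flex >= 0:
--             flex_points.append([start_flex, end_flex])
--
--     return flex_points
-- ===== SOURCE B (Python) =====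
-- def find_flex_points(input, map):
--     n = len(input)
--     breaks = [i for i in range(n)
--               if len(map[input[i]]) == 1 and len(map[map[input[i]][0]]) > 1]
--     ranges = []
--     s = 0
--     for b in breaks:
--         ranges.append([s, b + 1])
--         s = b + 1
--     if s < n:
--         ranges.append([s, n - 1])
--     return ranges
-- ===== Notes on version B (the rewrite author's own statement) =====
-- stated objective: simpler
-- what changed: Replaces the nested while-loops with manual index arithmetic by a two-phase decomposition: first collect all breakpoint indices with one comprehension, then emit the [start, break+1] segments and the trailing [start, n-1] segment by a plain loop over that list.
import Mathlib
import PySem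

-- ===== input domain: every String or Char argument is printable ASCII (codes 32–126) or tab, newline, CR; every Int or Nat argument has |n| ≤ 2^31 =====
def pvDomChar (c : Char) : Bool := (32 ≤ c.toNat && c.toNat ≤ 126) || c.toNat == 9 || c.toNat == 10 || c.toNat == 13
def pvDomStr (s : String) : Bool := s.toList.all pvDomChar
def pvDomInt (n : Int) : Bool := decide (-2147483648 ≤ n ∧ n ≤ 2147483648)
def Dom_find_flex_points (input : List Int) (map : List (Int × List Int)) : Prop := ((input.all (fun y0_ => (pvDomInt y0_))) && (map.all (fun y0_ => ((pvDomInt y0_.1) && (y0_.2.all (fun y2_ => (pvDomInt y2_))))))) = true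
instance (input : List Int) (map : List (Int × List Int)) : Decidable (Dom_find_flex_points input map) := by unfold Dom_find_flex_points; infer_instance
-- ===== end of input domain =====

-- B replaces A's nested while-loops by a two-phase decomposition (collect breakpoint
-- indices, then emit segments); objective: simpler, same O(n) cost.


-- ===== PORT A =====
-- the breakpoint test 'len(map[input[i]]) == 1 and len(map[map[input[i]][0]]) > 1',
-- written with a default lookup; Pre_ guarantees both dict lookups succeed, where it
-- coincides with Python (outside Pre_ the Python raises KeyError).
def pvBreakAt (map : List (Int × List Int)) (x : Int) : Bool :=
  let v := ((PySem.Dict.mk map).getD x [])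
  v.length == 1 && ((PySem.Dict.mk map).getD v.headI []).length > 1

-- inner 'while i < len(input) and not (...)' loop; state (i, end_flex); the fuel
-- argument only bounds iterations (input.length - i suffices), it changes no value
def pvInnerA (input : List Int) (map : List (Int × List Int)) : Nat → Nat → Int → Nat × Int
  | 0, i, ef => (i, ef)
  | fuel + 1, i, ef =>
    if i < input.length ∧ pvBreakAt map (input.getD i 0) = false then
      pvInnerA input map fuel (i + 1) (Int.ofNat i)
    else (i, ef)

-- outer 'while i < len(input)' loop (fuel: input.length suffices, i strictly increases)
def pvOuterA (input : List Int) (map : List (Int × List Int)) : Nat → Nat → List (List Int)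
  | 0, _ => []
  | fuel + 1, i =>
    if i < input.length then
      let start := i
      let r := pvInnerA input map input.length i (-1)
      let i2 := r.1 + 1
      let ef : Int := if input.length < i2 then (input.length : Int) - 1 else (i2 : Int)
      let rest := pvOuterA input map fuel i2
      if 0 ≤ ef then [(start : Int), ef] :: rest else rest
    else []

def find_flex_points (input : List Int) (map : List (Int × List Int)) : List (List Int) :=
  pvOuterA input map input.length 0

-- ===== PORT B =====
def find_flex_points_alt (input : List Int) (map : List (Int × List Int)) : List (List Int) :=
  let n := input.length
  let breaks := (List.range n).filter (fun i => pvBreakAt map (input.getD i 0))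
  let p := breaks.foldl
    (fun (p : List (List Int) × Nat) (b : Nat) => (p.1 ++ [[(p.2 : Int), (b : Int) + 1]], b + 1))
    ([], 0)
  if p.2 < n then p.1 ++ [[(p.2 : Int), (n : Int) - 1]] else p.1

-- ===== PRECONDITION & SPEC =====
-- the breakpoint test looks up map[input[i]] and (when that value is a singleton) map of
-- its head; Python raises KeyError when a lookup is missing — Pre_ admits exactly the
-- inputs where every such lookup succeeds.
def pvOkKey (map : List (Int × List Int)) (x : Int) : Bool :=
  match (PySem.Dict.mk map).get? x with
  | none => false
  | some v => !(v.length == 1) || ((PySem.Dict.mk map).get? v.headI).isSome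

def Pre_find_flex_points (input : List Int) (map : List (Int × List Int)) : Prop :=
  ∀ x ∈ input, pvOkKey map x = true
instance (input : List Int) (map : List (Int × List Int)) : Decidable (Pre_find_flex_points input map) := by unfold Pre_find_flex_points; infer_instance

def pvWitness_find_flex_points : List Int × (List (Int × List Int)) :=
  ([1, 2, 2, 3], [(1, [2]), (2, [1, 3]), (3, [2])])

def Spec_find_flex_points (input : List Int) (map : List (Int × List Int)) (out : List (List Int)) : Prop := out = find_flex_points_alt input map
instance (input : List Int) (map : List (Int × List Int)) (out : List (List Int)) : Decidable (Spec_find_flex_points input map out) := by unfold Spec_find_flex_points; infer_instance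

-- ===== CLAIM (what is proved, stated in full; the proofs are below) =====
def Claim_equal_find_flex_points : Prop := ∀ (input : List Int) (map : List (Int × List Int)), Dom_find_flex_points input map → Pre_find_flex_points input map → Spec_find_flex_points input map (find_flex_points input map)

-- ===== LEMMAS AND PROOFS =====

-- breakpoint indices at positions ≥ s
def pvBreaksFrom (input : List Int) (map : List (Int × List Int)) (s : Nat) : List Nat :=
  (List.range' s (input.length - s)).filter (fun i => pvBreakAt map (input.getD i 0))

-- B's segment builder, in recursive form
def pvGoB (n : Nat) : List Nat → Nat → List (List Int)
  | [], s => if s < n then [[(s : Int), (n : Int) - 1]] else []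
  | b :: t, s => [(s : Int), (b : Int) + 1] :: pvGoB n t (b + 1)

theorem pvBreaksFrom_empty (input : List Int) (map : List (Int × List Int)) (s : Nat)
    (h : input.length ≤ s) : pvBreaksFrom input map s = [] := by
  simp [pvBreaksFrom, Nat.sub_eq_zero_of_le h]

theorem pvBreaksFrom_step (input : List Int) (map : List (Int × List Int)) (s : Nat)
    (h : s < input.length) :
    pvBreaksFrom input map s =
      if pvBreakAt map (input.getD s 0) then s :: pvBreaksFrom input map (s + 1)
      else pvBreaksFrom input map (s + 1) := by
  have h1 : input.length - s = (input.length - (s + 1)) + 1 := by omega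
  rw [pvBreaksFrom, h1, List.range'_succ, List.filter_cons]
  split <;> rename_i hp <;> simp_all [pvBreaksFrom]

theorem pvBreaksFrom_mem (input : List Int) (map : List (Int × List Int)) (s b : Nat)
    (h : b ∈ pvBreaksFrom input map s) : s ≤ b ∧ b < input.length := by
  have := (List.mem_filter.1 h).1
  have := List.mem_range'_1.1 this
  omega

theorem pvBreaksFrom_tail (input : List Int) (map : List (Int × List Int)) (s b : Nat)
    (t : List Nat) (h : pvBreaksFrom input map s = b :: t) :
    pvBreaksFrom input map (b + 1) = t := by
  by_cases hs : s < input.length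
  · rw [pvBreaksFrom_step input map s hs] at h
    split at h
    · cases h; rfl
    · exact pvBreaksFrom_tail input map (s + 1) b t h
  · rw [pvBreaksFrom_empty input map s (by omega)] at h
    cases h
termination_by input.length - s

theorem pvInnerA_fst (input : List Int) (map : List (Int × List Int)) (fuel : Nat) :
    ∀ (s : Nat), s ≤ input.length → input.length - s ≤ fuel → ∀ (ef : Int),
    (pvInnerA input map fuel s ef).1 =
      (match pvBreaksFrom input map s with | [] => input.length | b :: _ => b) := by
  induction fuel with
  | zero =>
    intro s h hf ef
    have : s = input.length := by omega
    rw [pvInnerA, pvBreaksFrom_empty input map s (by omega)]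
    simpa using this
  | succ fuel ih =>
    intro s h hf ef
    rw [pvInnerA]
    split <;> rename_i hc
    · rw [ih (s + 1) (by omega) (by omega) (Int.ofNat s)]
      rw [pvBreaksFrom_step input map s hc.1, if_neg (by simp only [hc.2]; simp)]
    · by_cases hs : s < input.length
      · have hp : pvBreakAt map (input.getD s 0) = true := by
          by_contra hq
          exact hc ⟨hs, by simpa using hq⟩
        rw [pvBreaksFrom_step input map s hs, if_pos hp]
      · have : s = input.length := by omega
        rw [pvBreaksFrom_empty input map s (by omega)]
        simpa using this

theorem pvOuterA_eq (input : List Int) (map : List (Int × List Int)) (fuel : Nat) :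
    ∀ (s : Nat), s ≤ input.length → input.length - s ≤ fuel →
    pvOuterA input map fuel s = pvGoB input.length (pvBreaksFrom input map s) s := by
  induction fuel with
  | zero =>
    intro s h hf
    have : s = input.length := by omega
    rw [pvOuterA, pvBreaksFrom_empty input map s (by omega), pvGoB, if_neg (by omega)]
  | succ fuel ih =>
    intro s h hf
    by_cases hs : s < input.length
    · rcases hb : pvBreaksFrom input map s with _ | ⟨b, t⟩
      · have h1 : (pvInnerA input map input.length s (-1)).1 = input.length := by
          rw [pvInnerA_fst input map input.length s h (by omega) (-1), hb]
        rw [pvOuterA, if_pos hs]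
        simp only [h1]
        rw [if_pos (by omega : input.length < input.length + 1)]
        rw [if_pos (by omega : (0 : Int) ≤ (input.length : Int) - 1)]
        have hrest : pvOuterA input map fuel (input.length + 1) = [] := by
          cases fuel <;> rw [pvOuterA] <;> simp
        rw [hrest, pvGoB, if_pos hs]
      · have hm := pvBreaksFrom_mem input map s b (by rw [hb]; exact List.mem_cons_self ..)
        have h1 : (pvInnerA input map input.length s (-1)).1 = b := by
          rw [pvInnerA_fst input map input.length s h (by omega) (-1), hb]
        rw [pvOuterA, if_pos hs]
        simp only [h1]
        rw [if_neg (by omega : ¬ input.length < b + 1)]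
        rw [if_pos (by positivity : (0 : Int) ≤ ((b + 1 : Nat) : Int))]
        rw [ih (b + 1) (by omega) (by omega)]
        rw [pvBreaksFrom_tail input map s b t hb, pvGoB]
        push_cast
        ring_nf
    · rw [pvOuterA, if_neg hs]
      rw [pvBreaksFrom_empty input map s (by omega), pvGoB, if_neg hs]

theorem pvFoldl_goB (n : Nat) (bs : List Nat) (acc : List (List Int)) (s : Nat) :
    (let p := bs.foldl
        (fun (p : List (List Int) × Nat) (b : Nat) =>
          (p.1 ++ [[(p.2 : Int), (b : Int) + 1]], b + 1)) (acc, s)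
     if p.2 < n then p.1 ++ [[(p.2 : Int), (n : Int) - 1]] else p.1) =
    acc ++ pvGoB n bs s := by
  induction bs generalizing acc s with
  | nil =>
    simp only [List.foldl_nil, pvGoB]
    split <;> simp
  | cons b t ih =>
    simp only [List.foldl_cons]
    rw [ih (acc ++ [[(s : Int), (b : Int) + 1]]) (b + 1), pvGoB]
    simp

-- ===== VERDICT (by name: the statement is the Claim_ definition above) =====
theorem find_flex_points_spec : Claim_equal_find_flex_points := by
  intro input map _ _
  unfold Spec_find_flex_points find_flex_points find_flex_points_alt
  rw [pvOuterA_eq input map input.length 0 (by omega) (by omega)]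
  have hr : (List.range input.length).filter
      (fun i => pvBreakAt map (input.getD i 0)) = pvBreaksFrom input map 0 := by
    rw [pvBreaksFrom, List.range_eq_range']
    simp
  simp only [hr]
  have hf := pvFoldl_goB input.length (pvBreaksFrom input map 0) [] 0
  simp only [List.nil_append] at hf
  exact hf.symm
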